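-- pv_equiv track=rewrite | github.com/Iljb/uav_dataset_generator | generator/validator.py | _path_guard
-- ===== SOURCE A (Python) =====
-- from typing import Any
--
-- def _parse_prev(prev: Any) -> tuple[str, str] | None:
--     if not isinstance(prev, str):
--         return None
--     parts = prev.split(".")
--     if len(parts) != 2:
--         return None
--     return parts[0], parts[1]
--
-- def _path_guard(
--     record: dict[str, Any],
--     records_by_id: dict[str, dict[str, Any]],
--     cache: dict[str, frozenset[tuple[str, str]]],
-- ) -> frozenset[tuple[str, str]]:
--     record_id = record.get("id")
--     if not isinstance(record_id, str):
--         return frozenset()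
--     if record_id in cache:
--         return cache[record_id]
--
--     parsed = _parse_prev(record.get("prev"))
--     if parsed is None:
--         guard = frozenset()
--     else:
--         prev_id, event = parsed
--         previous = records_by_id.get(prev_id)
--         previous_guard = (
--             _path_guard(previous, records_by_id, cache)
--             if previous is not None
--             else frozenset()
--         )
--         guard = previous_guard | frozenset({(prev_id, event)})
--
--     cache[record_id] = guard
--     return guard
-- ===== SOURCE B (Python) =====
-- # B: iterative two-phase rewrite of the memoized recursion: descend the prev-chain
-- # with an explicit stack, then fold back up accumulating the guard set.
-- # Performs the same cache mutation as A; same complexity ("alternative").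
-- def _parse_prev(prev):
--     if not isinstance(prev, str):
--         return None
--     parts = prev.split(".")
--     if len(parts) != 2:
--         return None
--     return parts[0], parts[1]
--
-- def _path_guard(record, records_by_id, cache):
--     stack = []
--     node = record
--     base = frozenset()
--     while True:
--         rid = node.get("id")
--         if not isinstance(rid, str):
--             break
--         if rid in cache:
--             base = cache[rid]
--             break
--         parsed = _parse_prev(node.get("prev"))
--         if parsed is None:
--             stack.append((rid, None))
--             break
--         stack.append((rid, parsed))
--         nxt = records_by_id.get(parsed[0])
--         if nxt is None:
--             break
--         node = nxt
--     acc = base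
--     for rid, pair in reversed(stack):
--         if pair is not None:
--             acc = acc | frozenset({pair})
--         cache[rid] = acc
--     return acc
-- ===== Notes on version B (the rewrite author's own statement) =====
-- stated objective: alternative
-- what changed: Replaces the memoized recursion by an explicit iterative descent that pushes each (id, parsed-prev) pair onto a stack until the chain hits a cached id, an unparsable prev, or a missing record, then folds back up the stack accumulating the union and writing the cache.
import Mathlib
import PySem

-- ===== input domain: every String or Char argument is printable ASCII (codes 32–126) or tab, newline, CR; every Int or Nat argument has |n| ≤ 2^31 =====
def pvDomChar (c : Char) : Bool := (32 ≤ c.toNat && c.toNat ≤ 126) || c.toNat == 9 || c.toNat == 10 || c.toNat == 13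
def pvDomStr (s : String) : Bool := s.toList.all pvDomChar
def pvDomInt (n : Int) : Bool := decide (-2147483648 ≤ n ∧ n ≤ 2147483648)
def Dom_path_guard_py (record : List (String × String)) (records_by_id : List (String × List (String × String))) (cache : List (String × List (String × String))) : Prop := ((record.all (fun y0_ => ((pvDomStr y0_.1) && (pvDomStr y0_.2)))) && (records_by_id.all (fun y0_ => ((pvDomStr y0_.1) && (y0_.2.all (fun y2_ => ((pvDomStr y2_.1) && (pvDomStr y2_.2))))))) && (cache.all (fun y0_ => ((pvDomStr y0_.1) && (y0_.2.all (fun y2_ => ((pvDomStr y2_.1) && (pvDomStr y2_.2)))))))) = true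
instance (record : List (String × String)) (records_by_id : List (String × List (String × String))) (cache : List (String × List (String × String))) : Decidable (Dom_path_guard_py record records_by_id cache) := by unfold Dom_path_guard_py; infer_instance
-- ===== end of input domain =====

-- B replaces A's memoized recursion by an explicit descend-with-a-stack loop plus a fold
-- back up the stack (alternative decomposition, same cost); the equivalence proved is about
-- the RETURN value only (both Pythons mutate `cache` in the same way, but that is not claimed here).

-- ===== PORT A =====
-- _parse_prev (shared helper of both Pythons)
def pvParsePrev (prev : Option String) : Option (String × String) :=
  match prev with
  | none => none                              -- not isinstance(prev, str)
  | some s =>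
    match PySem.Str.split? s "." with         -- prev.split(".") (sep ≠ "" → always some)
    | some [a, b] => some (a, b)              -- len(parts) == 2 → (parts[0], parts[1])
    | _ => none

-- A's recursion, fuel-bounded (fuel only makes it total; under Pre_ the fuel is never exhausted);
-- the mutated cache is threaded as the second component of the state.
def pvPathA : Nat → List (String × String) → PySem.Dict String (List (String × String)) → PySem.Dict String (List (String × String)) → (List (String × String)) × PySem.Dict String (List (String × String))
  | 0, _, _, cache => ([], cache)
  | fuel+1, record, rbi, cache =>
    match (PySem.Dict.mk record).get? "id" with
    | none => ([], cache)                     -- record_id not a str → frozenset()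
    | some rid =>
      match cache.get? rid with
      | some g => (g, cache)                  -- record_id in cache
      | none =>
        let gc :=
          match pvParsePrev ((PySem.Dict.mk record).get? "prev") with
          | none => (([] : List (String × String)), cache)
          | some pe =>
            match rbi.get? pe.1 with
            | none => (PySem.Set.add [] pe, cache)   -- frozenset() | {(prev_id, event)}
            | some prevRec =>
              let r := pvPathA fuel prevRec rbi cache
              (PySem.Set.add r.1 pe, r.2)            -- previous_guard | {(prev_id, event)}
        (gc.1, gc.2.insert rid gc.1)          -- cache[record_id] = guard

def path_guard_py (record : List (String × String)) (records_by_id : List (String × List (String × String))) (cache : List (String × List (String × String))) : List (String × String) :=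
  (pvPathA (records_by_id.length + 2) record (PySem.Dict.mk records_by_id) (PySem.Dict.mk cache)).1

-- ===== PORT B =====
-- phase 1: the while-loop; tail recursion on fuel = the loop, `st` is the growing stack,
-- second component of the result is `base`
def pvDescend : Nat → PySem.Dict String (List (String × String)) → PySem.Dict String (List (String × String)) → List (String × String) → List (String × Option (String × String)) → (List (String × Option (String × String))) × List (String × String)
  | 0, _, _, _, st => (st, [])
  | fuel+1, rbi, cache, node, st =>
    match (PySem.Dict.mk node).get? "id" with
    | none => (st, [])
    | some rid =>
      match cache.get? rid with
      | some g => (st, g)                     -- base = cache[rid]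
      | none =>
        match pvParsePrev ((PySem.Dict.mk node).get? "prev") with
        | none => (st ++ [(rid, none)], [])
        | some pe =>
          match rbi.get? pe.1 with
          | none => (st ++ [(rid, some pe)], [])
          | some nxt => pvDescend fuel rbi cache nxt (st ++ [(rid, some pe)])

-- phase 2: one step of the `for rid, pair in reversed(stack)` loop (state = (acc, cache))
def pvStep (s : (List (String × String)) × PySem.Dict String (List (String × String))) (item : String × Option (String × String)) : (List (String × String)) × PySem.Dict String (List (String × String)) :=
  let acc := match item.2 with | none => s.1 | some pr => PySem.Set.add s.1 pr
  (acc, s.2.insert item.1 acc)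

def path_guard_py_alt (record : List (String × String)) (records_by_id : List (String × List (String × String))) (cache : List (String × List (String × String))) : List (String × String) :=
  let rbi := PySem.Dict.mk records_by_id
  let c := PySem.Dict.mk cache
  let sb := pvDescend (records_by_id.length + 2) rbi c record []
  (sb.1.reverse.foldl pvStep (sb.2, c)).1

-- ===== PRECONDITION & SPEC =====
-- successor of one node along the prev-chain (none = the chain stops there)
def pvChainStep (rbi cache : PySem.Dict String (List (String × String))) (node : List (String × String)) : Option (List (String × String)) :=
  match (PySem.Dict.mk node).get? "id" with
  | none => none
  | some rid =>
    if (cache.get? rid).isSome then none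
    else match pvParsePrev ((PySem.Dict.mk node).get? "prev") with
      | none => none
      | some pe => rbi.get? pe.1

-- Pre_ excludes exactly the inputs whose prev-chain from `record` is cyclic (never reaches a
-- terminal node): there Python A diverges with RecursionError, so nothing is claimed. It is a
-- pure graph-reachability condition (the chain dies out within |records_by_id|+2 successor
-- steps); it computes no guard sets and no caching.
def Pre_path_guard_py (record : List (String × String)) (records_by_id : List (String × List (String × String))) (cache : List (String × List (String × String))) : Prop :=
  (fun o : Option (List (String × String)) => o.bind (pvChainStep (PySem.Dict.mk records_by_id) (PySem.Dict.mk cache)))^[records_by_id.length + 2] (some record) = none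

instance (record : List (String × String)) (records_by_id : List (String × List (String × String))) (cache : List (String × List (String × String))) : Decidable (Pre_path_guard_py record records_by_id cache) := by unfold Pre_path_guard_py; infer_instance

def pvWitness_path_guard_py : (List (String × String)) × (List (String × List (String × String))) × (List (String × List (String × String))) :=
  ([("id", "a"), ("prev", "b.x")], [("b", [("id", "b")])], [])

def Spec_path_guard_py (record : List (String × String)) (records_by_id : List (String × List (String × String))) (cache : List (String × List (String × String))) (out : List (String × String)) : Prop := out = path_guard_py_alt record records_by_id cache
instance (record : List (String × String)) (records_by_id : List (String × List (String × String))) (cache : List (String × List (String × String))) (out : List (String × String)) : Decidable (Spec_path_guard_py record records_by_id cache out) := by unfold Spec_path_guard_py; infer_instance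

-- ===== CLAIM (what is proved, stated in full; the proofs are below) =====
def Claim_equal_path_guard_py : Prop := ∀ (record : List (String × String)) (records_by_id : List (String × List (String × String))) (cache : List (String × List (String × String))), Dom_path_guard_py record records_by_id cache → Pre_path_guard_py record records_by_id cache → Spec_path_guard_py record records_by_id cache (path_guard_py record records_by_id cache)

-- ===== LEMMAS AND PROOFS =====

-- the stack accumulator of the descend loop factors out
theorem pvDescend_acc (fuel : Nat) (rbi cache : PySem.Dict String (List (String × String))) :
    ∀ (node : List (String × String)) (st : List (String × Option (String × String))),
      pvDescend fuel rbi cache node st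
        = (st ++ (pvDescend fuel rbi cache node []).1, (pvDescend fuel rbi cache node []).2) := by
  induction fuel with
  | zero => intro node st; simp [pvDescend]
  | succ fuel ih =>
    intro node st
    simp only [pvDescend]
    cases h1 : (PySem.Dict.mk node).get? "id" with
    | none => simp
    | some rid =>
      cases h2 : cache.get? rid with
      | some g => simp [h2]
      | none =>
        cases h3 : pvParsePrev ((PySem.Dict.mk node).get? "prev") with
        | none => simp [h2]
        | some pe =>
          cases h4 : (rbi.get? pe.1) with
          | none => simp [h2, h4]
          | some nxt =>
            simp only [h2, h4, List.nil_append]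
            rw [ih nxt (st ++ [(rid, some pe)]), ih nxt [(rid, some pe)]]
            simp

-- A's recursion equals B's two phases, for EVERY fuel (so in particular for the common fuel)
theorem pvPathA_eq_phases (rbi cache : PySem.Dict String (List (String × String))) :
    ∀ (fuel : Nat) (node : List (String × String)),
      pvPathA fuel node rbi cache
        = (pvDescend fuel rbi cache node []).1.reverse.foldl pvStep
            ((pvDescend fuel rbi cache node []).2, cache) := by
  intro fuel
  induction fuel with
  | zero => intro node; simp [pvPathA, pvDescend]
  | succ fuel ih =>
    intro node
    simp only [pvPathA, pvDescend]
    cases h1 : (PySem.Dict.mk node).get? "id" with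
    | none => simp
    | some rid =>
      cases h2 : cache.get? rid with
      | some g => simp [h2]
      | none =>
        cases h3 : pvParsePrev ((PySem.Dict.mk node).get? "prev") with
        | none => simp [h2, pvStep]
        | some pe =>
          cases h4 : (rbi.get? pe.1) with
          | none => simp [h2, h4, pvStep]
          | some nxt =>
            simp only [h2, h4, List.nil_append]
            rw [pvDescend_acc fuel rbi cache nxt [(rid, some pe)]]
            simp only [List.cons_append, List.nil_append, List.reverse_cons,
              List.foldl_append, ih nxt]
            simp [pvStep]

-- ===== VERDICT (by name: the statement is the Claim_ definition above) =====
theorem path_guard_py_spec : Claim_equal_path_guard_py := by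
  intro record records_by_id cache _ _
  unfold Spec_path_guard_py path_guard_py path_guard_py_alt
  rw [pvPathA_eq_phases]
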